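-- pv_equiv track=rewrite | github.com/AremanHashemi/Practice_Problems | LeetCode/Python/simliarSentance.py | similarSentence
-- ===== SOURCE A (Python) =====
-- def similarSentence(s1: str, s2: str):
--    s1Dict = {}
--    s1 = s1.lower()
--    s2 = s2.lower()
--    for word in s1.split(sep=' '):
--       s1Dict[word] = True
--
--    for word in s2.split(sep=' '):
--       if not s1Dict.pop(word, False):
--          return False
--
--    if len(s1Dict) == 0:
--       return True
--    return False
-- ===== SOURCE B (Python) =====
-- def similarSentence(s1: str, s2: str):
--     return sorted(set(s1.lower().split(' '))) == sorted(s2.lower().split(' '))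
-- ===== Notes on version B (the rewrite author's own statement) =====
-- stated objective: simpler
-- what changed: Replaces A's dict build plus pop-consumption loop with early returns by a single comparison of sorted word lists: sorted(set(s1words)) == sorted(s2words), which captures exactly 'same word set and no repeated word in s2'.
import Mathlib
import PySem

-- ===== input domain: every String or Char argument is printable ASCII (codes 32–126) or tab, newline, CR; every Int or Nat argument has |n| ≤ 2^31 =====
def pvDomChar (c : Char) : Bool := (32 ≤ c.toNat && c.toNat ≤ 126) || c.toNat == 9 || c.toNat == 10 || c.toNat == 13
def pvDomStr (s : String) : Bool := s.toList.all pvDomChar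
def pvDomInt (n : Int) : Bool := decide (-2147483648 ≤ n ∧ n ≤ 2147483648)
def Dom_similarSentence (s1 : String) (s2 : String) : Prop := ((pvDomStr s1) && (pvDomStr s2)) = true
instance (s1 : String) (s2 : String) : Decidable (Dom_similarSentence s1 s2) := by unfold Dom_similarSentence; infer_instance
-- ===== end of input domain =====

-- B replaces A's dict-building-and-pop-consumption loop by one comparison of sorted word lists
-- (sorted(set(words1)) == sorted(words2)); objective: simpler, not claimed faster.

-- ===== PORT A =====
-- loop body of A's second for-loop: state none = "the function has already returned False";
-- s1Dict.pop(word, False) is Dict.pop? (some = present: value and the dict without the key; none = absent, default False, so return False)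
def pvPopStep (acc : Option (PySem.Dict String Bool)) (w : String) : Option (PySem.Dict String Bool) :=
  match acc with
  | none => none
  | some d =>
    match PySem.Dict.pop? d w with
    | some (v, d') => if v then some d' else none
    | none => none

def similarSentence (s1 : String) (s2 : String) : Bool :=
  let s1l := PySem.Str.lower s1
  let s2l := PySem.Str.lower s2
  -- s.split(sep=' '): the separator is the nonempty literal " ", so split? is always `some`; getD [] only totalizes
  let w1 := (PySem.Str.split? s1l " ").getD []
  let w2 := (PySem.Str.split? s2l " ").getD []
  let d0 : PySem.Dict String Bool := w1.foldl (fun d w => d.insert w true) PySem.Dict.empty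
  match w2.foldl pvPopStep (some d0) with
  | none => false
  | some d => d.size == 0

-- ===== PORT B =====
def similarSentence_alt (s1 : String) (s2 : String) : Bool :=
  let w1 := (PySem.Str.split? (PySem.Str.lower s1) " ").getD []
  let w2 := (PySem.Str.split? (PySem.Str.lower s2) " ").getD []
  decide (PySem.List.sorted (PySem.Set.ofList w1) (fun x => x) false
        = PySem.List.sorted w2 (fun x => x) false)

-- ===== PRECONDITION & SPEC =====
def Spec_similarSentence (s1 : String) (s2 : String) (out : Bool) : Prop := out = similarSentence_alt s1 s2
instance (s1 : String) (s2 : String) (out : Bool) : Decidable (Spec_similarSentence s1 s2 out) := by unfold Spec_similarSentence; infer_instance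

-- ===== CLAIM (what is proved, stated in full; the proofs are below) =====
def Claim_equal_similarSentence : Prop := ∀ (s1 : String) (s2 : String), Dom_similarSentence s1 s2 → Spec_similarSentence s1 s2 (similarSentence s1 s2)

-- ===== LEMMAS AND PROOFS =====

-- once A's loop has "returned False", it stays returned
lemma pv_foldl_none (ws : List String) : ws.foldl pvPopStep none = none := by
  induction ws with
  | nil => rfl
  | cons w t ih => simpa [pvPopStep] using ih

-- filtering a key out of an association list with unique keys = List.erase on the key list
lemma pv_map_fst_filter {κ ν : Type} [BEq κ] [LawfulBEq κ] (k : κ) (l : List (κ × ν))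
    (h : (l.map (fun p => p.1)).Nodup) :
    ((l.filter (fun p => !(p.1 == k))).map (fun p => p.1)) = (l.map (fun p => p.1)).erase k := by
  induction l with
  | nil => simp
  | cons p t ih =>
    simp only [List.map_cons, List.nodup_cons] at h
    by_cases hk : p.1 = k
    · have hfix : t.filter (fun q => !(q.1 == k)) = t := by
        apply List.filter_eq_self.mpr
        intro q hq
        simp only [Bool.not_eq_eq_eq_not, Bool.not_true, beq_eq_false_iff_ne, ne_eq]
        intro he
        exact h.1 (by rw [hk, ← he]; exact List.mem_map_of_mem hq)
      simp [hk, hfix, List.erase_cons_head]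
    · rw [List.map_cons, List.erase_cons_tail (b := p.1) (a := k) (by simp [hk])]
      simp [hk, ih h.2]

lemma pv_keys_erase (d : PySem.Dict String Bool) (k : String) (h : d.keys.Nodup) :
    (d.erase k).keys = d.keys.erase k := by
  simpa [PySem.Dict.erase, PySem.Dict.keys] using
    pv_map_fst_filter k d.items (by simpa [PySem.Dict.keys] using h)

-- the loop of A returns True exactly when the s2 words are a permutation of the remaining keys
lemma pv_loop_spec (ws : List String) (d : PySem.Dict String Bool)
    (hnd : d.keys.Nodup) (hv : ∀ p ∈ d.items, p.2 = true) :
    (match ws.foldl pvPopStep (some d) with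
     | none => false
     | some d' => d'.size == 0) = decide (ws.Perm d.keys) := by
  induction ws generalizing d with
  | nil =>
    rcases d with ⟨items⟩
    cases items <;> simp [PySem.Dict.size, PySem.Dict.keys]
  | cons w t ih =>
    have hstep : List.foldl pvPopStep (some d) (w :: t) = List.foldl pvPopStep (pvPopStep (some d) w) t := rfl
    cases hg : d.get? w with
    | none =>
      have hw : w ∉ d.keys := (PySem.Dict.get?_eq_none_iff_not_mem_keys d w).mp hg
      have hs : pvPopStep (some d) w = none := by simp [pvPopStep, PySem.Dict.pop?, hg]
      rw [hstep, hs, pv_foldl_none]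
      have hnp : ¬ (w :: t).Perm d.keys := fun hp => hw (hp.mem_iff.mp (List.mem_cons_self))
      simp [hnp]
    | some v =>
      have hmem : (w, v) ∈ d.items := PySem.Dict.mem_items_of_get?_eq_some d hg
      have hvt : v = true := hv _ hmem
      have hw : w ∈ d.keys := PySem.Dict.mem_keys_of_mem_items d hmem
      have hs : pvPopStep (some d) w = some (d.erase w) := by
        simp [pvPopStep, PySem.Dict.pop?, hg, hvt]
      have hnd' : (d.erase w).keys.Nodup := by
        rw [pv_keys_erase d w hnd]; exact hnd.erase w
      have hv' : ∀ p ∈ (d.erase w).items, p.2 = true := by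
        intro p hp
        have hp' : p ∈ d.items := by
          have h0 := hp
          simp [PySem.Dict.erase, List.mem_filter] at h0
          exact h0.1
        exact hv p hp'
      rw [hstep, hs, ih _ hnd' hv', pv_keys_erase d w hnd]
      simp [List.cons_perm_iff_perm_erase, hw]

-- every value stored by A's first loop is True
lemma pv_values_true (l : List String) (d : PySem.Dict String Bool)
    (h : ∀ p ∈ d.items, p.2 = true) :
    ∀ p ∈ (l.foldl (fun d w => d.insert w true) d).items, p.2 = true := by
  induction l generalizing d with
  | nil => exact h
  | cons w t ih =>
    intro p hp
    refine ih (d.insert w true) ?_ p hp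
    intro q hq
    rcases (PySem.Dict.mem_items_insert d w true q).mp hq with h1 | h2
    · rw [h1]
    · exact h q h2.1

-- both programs, on the same word lists
lemma pv_ab (w1 w2 : List String) :
    (match w2.foldl pvPopStep
        (some (w1.foldl (fun d w => d.insert w true) (PySem.Dict.empty : PySem.Dict String Bool))) with
     | none => false
     | some d => d.size == 0)
    = decide (PySem.List.sorted (PySem.Set.ofList w1) (fun x => x) false
            = PySem.List.sorted w2 (fun x => x) false) := by
  have hkeys : (w1.foldl (fun d w => d.insert w true) (PySem.Dict.empty : PySem.Dict String Bool)).keys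
      = PySem.Set.ofList w1 := by
    simpa [PySem.Dict.keys_empty, PySem.Set.update_nil_left] using
      PySem.Dict.keys_foldl_insert (l := w1) (f := fun _ _ => true) (d := PySem.Dict.empty)
  have hnd : (w1.foldl (fun d w => d.insert w true) (PySem.Dict.empty : PySem.Dict String Bool)).keys.Nodup :=
    PySem.Dict.nodup_keys_foldl_insert w1 (fun _ _ => true) PySem.Dict.empty PySem.Dict.nodup_keys_empty
  have hv := pv_values_true w1 PySem.Dict.empty (by intro p hp; simp [PySem.Dict.empty] at hp)
  rw [pv_loop_spec w2 _ hnd hv, hkeys, decide_eq_decide]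
  constructor
  · intro h; exact (PySem.List.sorted_id_eq_sorted_id_iff_perm _ _).mpr h.symm
  · intro h; exact ((PySem.List.sorted_id_eq_sorted_id_iff_perm _ _).mp h).symm

-- ===== VERDICT (by name: the statement is the Claim_ definition above) =====
theorem similarSentence_spec : Claim_equal_similarSentence := by
  intro s1 s2 _
  unfold Spec_similarSentence similarSentence similarSentence_alt
  exact pv_ab _ _
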